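-- pv_equiv track=rewrite | github.com/Sdas08217/GFG-POTD | Oct_2024/Oct_24.py | modifyAndRearrangeArr
-- ===== SOURCE A (Python) =====
-- def modifyAndRearrangeArr(arr):
--     n = len(arr)
--
--     # Step 1: Modify the array by doubling and setting next element to 0 if consecutive are equal
--     for i in range(n - 1):
--         if arr[i] != 0 and arr[i] == arr[i + 1]:
--             arr[i] *= 2  # Double the current element
--             arr[i + 1] = 0  # Set the next element to 0
--
--     # Step 2: Rearrange the array to move all non-zero elements to the front
--     # Using two pointers to shift non-zero elements to the left
--     non_zero_index = 0
--
--     for i in range(n):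
--         if arr[i] != 0:
--             arr[non_zero_index] = arr[i]
--             non_zero_index += 1
--
--     # Fill the rest of the array with 0s
--     for i in range(non_zero_index, n):
--         arr[i] = 0
--
--     return arr  # Optional, if needed to return modified array
-- ===== SOURCE B (Python) =====
-- def modifyAndRearrangeArr(arr):
--     # One forward pass: greedily pair equal nonzero neighbors, collect nonzeros, then write back.
--     n = len(arr)
--     res = []
--     i = 0
--     while i < n:
--         v = arr[i]
--         if v != 0 and i + 1 < n and arr[i + 1] == v:
--             res.append(2 * v)
--             i += 2
--         elif v != 0:
--             res.append(v)
--             i += 1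
--         else:
--             i += 1
--     k = len(res)
--     arr[:k] = res
--     arr[k:] = [0] * (n - k)
--     return arr
-- ===== Notes on version B (the rewrite author's own statement) =====
-- stated objective: alternative
-- what changed: A makes three index-based passes over arr (pair-and-double leaving zeros behind, then compact nonzeros left with two pointers, then zero-fill the tail); B does the pairing and nonzero collection in a single forward sweep that consumes two elements on an equal nonzero pair, then pads the collected values with zeros.
import Mathlib
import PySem

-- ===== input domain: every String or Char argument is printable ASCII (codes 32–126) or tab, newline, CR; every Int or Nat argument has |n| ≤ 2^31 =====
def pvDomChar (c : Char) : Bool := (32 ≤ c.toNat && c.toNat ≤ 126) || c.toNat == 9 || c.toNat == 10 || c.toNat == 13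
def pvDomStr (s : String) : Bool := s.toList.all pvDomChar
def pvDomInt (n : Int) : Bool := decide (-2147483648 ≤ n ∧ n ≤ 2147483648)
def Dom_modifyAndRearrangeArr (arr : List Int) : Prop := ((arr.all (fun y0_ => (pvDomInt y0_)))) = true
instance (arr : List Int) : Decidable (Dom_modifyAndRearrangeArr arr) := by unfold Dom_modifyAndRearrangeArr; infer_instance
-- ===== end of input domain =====

-- B replaces A's three index-loop passes by a single forward pass with a skip flag
-- (pair-and-collect in one sweep), then pads with zeros; equivalence is about the
-- RETURN value only (both Pythons also mutate arr in place to the same final content).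

-- ===== PORT A =====
-- A-side helpers: the bodies of A's three loops, one per pass.
def aStep1 (a : List Int) (i : Int) : List Int :=
  if PySem.List.pyGetD a i 0 ≠ 0 ∧ PySem.List.pyGetD a i 0 = PySem.List.pyGetD a (i + 1) 0 then
    (a.set i.toNat (PySem.List.pyGetD a i 0 * 2)).set (i + 1).toNat 0
  else a

def aStep2 (p : List Int × Int) (i : Int) : List Int × Int :=
  if PySem.List.pyGetD p.1 i 0 ≠ 0 then
    (p.1.set p.2.toNat (PySem.List.pyGetD p.1 i 0), p.2 + 1)
  else p

def modifyAndRearrangeArr (arr : List Int) : List Int :=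
  let n : Int := arr.length
  let a1 := (PySem.List.pyRange 0 (n - 1) 1).foldl aStep1 arr
  let p := (PySem.List.pyRange 0 n 1).foldl aStep2 (a1, 0)
  (PySem.List.pyRange p.2 n 1).foldl (fun a i => a.set i.toNat 0) p.1

-- ===== PORT B =====
-- B's while loop: consume one element (or two, when a nonzero element equals its
-- successor), collecting the nonzero results left to right.
def altLoop : List Int → List Int
  | [] => []
  | [x] => if x ≠ 0 then [x] else []
  | x :: y :: t =>
    if x ≠ 0 ∧ y = x then 2 * x :: altLoop t
    else if x ≠ 0 then x :: altLoop (y :: t)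
    else altLoop (y :: t)

def modifyAndRearrangeArr_alt (arr : List Int) : List Int :=
  let res := altLoop arr
  res ++ List.replicate (arr.length - res.length) 0

-- ===== PRECONDITION & SPEC =====
def Spec_modifyAndRearrangeArr (arr : List Int) (out : List Int) : Prop := out = modifyAndRearrangeArr_alt arr
instance (arr : List Int) (out : List Int) : Decidable (Spec_modifyAndRearrangeArr arr out) := by unfold Spec_modifyAndRearrangeArr; infer_instance

-- ===== CLAIM (what is proved, stated in full; the proofs are below) =====
def Claim_equal_modifyAndRearrangeArr : Prop := ∀ (arr : List Int), Dom_modifyAndRearrangeArr arr → Spec_modifyAndRearrangeArr arr (modifyAndRearrangeArr arr)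

-- ===== LEMMAS AND PROOFS =====

-- Functional form of A's first pass: greedy left-to-right pairing, the consumed
-- second element left behind as 0.
def pair : List Int → List Int
  | [] => []
  | [x] => [x]
  | x :: y :: t => if x ≠ 0 ∧ x = y then x * 2 :: 0 :: pair t else x :: pair (y :: t)

theorem pair_length (s : List Int) : (pair s).length = s.length := by
  match s with
  | [] => rfl
  | [x] => rfl
  | x :: y :: t =>
    simp only [pair]
    split
    · simp [pair_length t]
    · simp [pair_length (y :: t)]
  termination_by s.length

theorem pyGetD_append_cons (p r : List Int) (x : Int) :
    PySem.List.pyGetD (p ++ x :: r) (p.length : Int) 0 = x := by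
  rw [PySem.List.pyGetD_natCast]
  simp [List.getD]

-- A's first pass, generalized: p already processed, s still to scan.
theorem step1_go (s p : List Int) :
    (PySem.List.pyRange (p.length : Int) ((p.length : Int) + (s.length : Int) - 1) 1).foldl aStep1 (p ++ s)
      = p ++ pair s := by
  match s with
  | [] => rw [PySem.List.pyRange_one_eq_nil (by simp)]; simp [pair]
  | [x] => rw [PySem.List.pyRange_one_eq_nil (by simp)]; simp [pair]
  | x :: y :: t =>
    have hlen : ((x :: y :: t).length : Int) = (t.length : Int) + 2 := by simp; omega
    rw [PySem.List.pyRange_one_cons (by rw [hlen]; omega), List.foldl_cons]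
    have hx : PySem.List.pyGetD (p ++ x :: y :: t) (p.length : Int) 0 = x :=
      pyGetD_append_cons p (y :: t) x
    have hcast1 : ((p.length : Int) + 1) = (((p ++ [x]).length : Nat) : Int) := by
      simp
    have hy : PySem.List.pyGetD (p ++ x :: y :: t) ((p.length : Int) + 1) 0 = y := by
      rw [hcast1, show p ++ x :: y :: t = (p ++ [x]) ++ y :: t by simp]
      exact pyGetD_append_cons (p ++ [x]) t y
    by_cases hc : x ≠ 0 ∧ x = y
    · have hstep : aStep1 (p ++ x :: y :: t) (p.length : Int) = p ++ x * 2 :: 0 :: t := by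
        rw [aStep1, if_pos (by rw [hx, hy]; exact hc)]
        rw [hx]
        rw [show ((p.length : Int)).toNat = p.length by simp]
        rw [show (p ++ x :: y :: t).set p.length (x * 2) = p ++ (x * 2) :: y :: t by simp]
        rw [show ((p.length : Int) + 1).toNat = (p ++ [x * 2]).length by simp]
        rw [show p ++ (x * 2) :: y :: t = (p ++ [x * 2]) ++ y :: t by simp,
            show ((p ++ [x * 2]) ++ y :: t).set (p ++ [x * 2]).length 0 = (p ++ [x * 2]) ++ 0 :: t by simp]
        simp
      rw [hstep]
      rw [show pair (x :: y :: t) = x * 2 :: 0 :: pair t by rw [pair, if_pos hc]]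
      match t with
      | [] =>
        rw [PySem.List.pyRange_one_eq_nil (by simp; omega)]
        simp [pair]
      | z :: u =>
        have hcA : ((p.length : Int) + 1) = (((p ++ [x * 2]).length : Nat) : Int) := by
          simp
        rw [PySem.List.pyRange_one_cons
          (show (p.length : Int) + 1 < (p.length : Int) + ((x :: y :: z :: u).length : Int) - 1 by
            simp; omega), List.foldl_cons]
        have h0 : aStep1 (p ++ x * 2 :: 0 :: z :: u) ((p.length : Int) + 1) = p ++ x * 2 :: 0 :: z :: u := by
          rw [aStep1, if_neg]
          rw [hcA, show p ++ x * 2 :: 0 :: z :: u = (p ++ [x * 2]) ++ 0 :: z :: u by simp,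
              pyGetD_append_cons (p ++ [x * 2]) (z :: u) 0]
          simp
        rw [h0]
        have hc2 : ((p.length : Int) + 1 + 1) = (((p ++ [x * 2, 0]).length : Nat) : Int) := by
          simp; ring
        have hc3 : ((p.length : Int) + ((x :: y :: z :: u).length : Int) - 1)
            = (((p ++ [x * 2, 0]).length : Int) + ((z :: u).length : Int) - 1) := by
          simp; ring
        rw [hc2, hc3, show p ++ x * 2 :: 0 :: z :: u = (p ++ [x * 2, 0]) ++ z :: u by simp]
        rw [step1_go (z :: u) (p ++ [x * 2, 0])]
        simp
    · have hstep : aStep1 (p ++ x :: y :: t) (p.length : Int) = p ++ x :: y :: t := by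
        rw [aStep1, if_neg (by rw [hx, hy]; exact hc)]
      rw [hstep]
      have hc3 : ((p.length : Int) + ((x :: y :: t).length : Int) - 1)
          = (((p ++ [x]).length : Int) + (((y :: t)).length : Int) - 1) := by
        simp; ring
      rw [hc3, hcast1, show p ++ x :: y :: t = (p ++ [x]) ++ y :: t by simp]
      rw [step1_go (y :: t) (p ++ [x])]
      rw [show pair (x :: y :: t) = x :: pair (y :: t) by rw [pair, if_neg hc]]
      simp
  termination_by s.length


-- A's second pass, generalized invariant.
theorem step2_go (a : List Int) (k nz : Nat) (hnz : nz ≤ k) (hk : k ≤ a.length) :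
    (PySem.List.pyRange (k : Int) (a.length : Int) 1).foldl aStep2 (a, (nz : Int))
      = (a.take nz ++ (a.drop k).filter (· ≠ 0) ++ a.drop (nz + ((a.drop k).filter (· ≠ 0)).length),
         (nz : Int) + (((a.drop k).filter (· ≠ 0)).length : Int)) := by
  by_cases h : k = a.length
  · subst h
    rw [PySem.List.pyRange_one_eq_nil (by omega)]
    simp
  · have hkn : k < a.length := by omega
    rw [PySem.List.pyRange_one_cons (by exact_mod_cast hkn)]
    rw [List.foldl_cons]
    have hget : PySem.List.pyGetD a (k : Int) 0 = a[k] := by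
      rw [PySem.List.pyGetD_natCast]
      simp [List.getD, List.getElem?_eq_getElem hkn]
    have hdropk : a.drop k = a[k] :: a.drop (k + 1) := List.drop_eq_getElem_cons hkn
    by_cases hz : a[k] = 0
    · have : aStep2 (a, (nz : Int)) (k : Int) = (a, (nz : Int)) := by
        simp [aStep2, hget, hz]
      rw [this, show ((k : Int) + 1) = ((k + 1 : Nat) : Int) by push_cast; ring,
          step2_go a (k+1) nz (by omega) (by omega)]
      rw [hdropk]
      simp [hz]
    · -- write case
      have : aStep2 (a, (nz : Int)) (k : Int)
          = (a.set nz a[k], ((nz + 1 : Nat) : Int)) := by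
        simp [aStep2, hget, hz]
      rw [this, show ((k : Int) + 1) = ((k + 1 : Nat) : Int) by push_cast; ring]
      have hlen : (a.set nz a[k]).length = a.length := by simp
      rw [show ((a.length : Nat) : Int) = ((a.set nz a[k]).length : Int) by rw [hlen],
          step2_go (a.set nz a[k]) (k+1) (nz+1) (by omega) (by omega)]
      have hdrop1 : (a.set nz a[k]).drop (k+1) = a.drop (k+1) := by
        rw [List.drop_set]
        simp [show nz < k + 1 by omega]
      have htake : (a.set nz a[k]).take (nz+1) = a.take nz ++ [a[k]] := by
        rw [List.take_add_one]
        rw [List.take_set]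
        rw [List.set_eq_of_length_le (by simp)]
        simp [show nz < a.length by omega]
      rw [hdrop1, htake, hdropk]
      simp only [List.filter_cons, show (decide (a[k] ≠ 0)) = true by simp [hz], if_pos]
      have hdrop3 : (a.set nz a[k]).drop (nz + 1 + ((a.drop (k+1)).filter (· ≠ 0)).length)
          = a.drop (nz + (a[k] :: (a.drop (k+1)).filter (· ≠ 0)).length) := by
        rw [List.drop_set]
        simp only [List.length_cons]
        rw [if_pos (by omega)]
        congr 1
        omega
      rw [hdrop3]
      rw [Prod.mk.injEq]
      constructor
      · simp
      · simp only [List.length_cons]; push_cast; ring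


-- A's third pass, generalized.
theorem step3_go (L : List Int) (k n : Nat) (hk : k ≤ n) (hL : L.length = n) :
    (PySem.List.pyRange (k : Int) (n : Int) 1).foldl (fun a i => a.set i.toNat 0) L
      = L.take k ++ List.replicate (n - k) 0 := by
  by_cases h : k = n
  · subst h
    rw [PySem.List.pyRange_one_eq_nil (by omega)]
    simp [List.take_of_length_le (by omega : L.length ≤ k)]
  · have hkn : k < n := by omega
    rw [PySem.List.pyRange_one_cons (by exact_mod_cast hkn)]
    have hc : ((k : Int) + 1) = ((k + 1 : Nat) : Int) := by push_cast; ring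
    rw [List.foldl_cons, hc, step3_go (L.set (k:Int).toNat 0) (k+1) n (by omega) (by simp [hL])]
    have hkL : k < L.length := by omega
    simp only [Int.toNat_natCast]
    rw [List.take_add_one]
    simp [hkL, List.take_set]
    rw [List.set_eq_of_length_le (by simp)]
    rw [show n - k = (n - (k+1)) + 1 by omega]
    simp [List.replicate_succ]


theorem altLoop_eq_filter_pair (s : List Int) : altLoop s = (pair s).filter (· ≠ 0) := by
  match s with
  | [] => rfl
  | [x] =>
    simp only [altLoop, pair, List.filter]
    by_cases hx : x = 0 <;> simp [hx]
  | x :: y :: t =>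
    simp only [altLoop, pair]
    by_cases hx : x = 0
    · subst hx
      simp [altLoop_eq_filter_pair (y :: t)]
    · by_cases hxy : x = y
      · subst hxy
        simp only [hx, ne_eq, not_false_iff, and_true, if_pos]
        have h2 : x * 2 ≠ 0 := by omega
        simp [altLoop_eq_filter_pair t, h2, mul_comm]
      · have : ¬ (x ≠ 0 ∧ y = x) := by tauto
        have : ¬ (x ≠ 0 ∧ x = y) := by tauto
        simp only [*]
        simp [altLoop_eq_filter_pair (y :: t), hx]
  termination_by s.length


-- ===== VERDICT (by name: the statement is the Claim_ definition above) =====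
theorem modifyAndRearrangeArr_spec : Claim_equal_modifyAndRearrangeArr := by
  intro arr _
  show modifyAndRearrangeArr arr = modifyAndRearrangeArr_alt arr
  simp only [modifyAndRearrangeArr, modifyAndRearrangeArr_alt]
  have h1 := step1_go arr []
  simp only [List.nil_append, List.length_nil, Nat.cast_zero, zero_add] at h1
  rw [h1]
  have h2 := step2_go (pair arr) 0 0 (le_refl 0) (Nat.zero_le _)
  rw [pair_length] at h2
  simp only [List.drop_zero, List.take_zero, List.nil_append, Nat.cast_zero,
    zero_add] at h2
  rw [h2]
  have hFle : ((pair arr).filter (· ≠ 0)).length ≤ arr.length := by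
    rw [← pair_length arr]; exact List.length_filter_le _ _
  have hL : (((pair arr).filter (· ≠ 0)) ++ (pair arr).drop (((pair arr).filter (· ≠ 0)).length)).length = arr.length := by
    have := List.length_filter_le (fun x => decide (x ≠ 0)) (pair arr)
    simp only [List.length_append, List.length_drop]
    rw [pair_length] at *
    omega
  rw [step3_go _ (((pair arr).filter (· ≠ 0)).length) arr.length hFle hL]
  rw [List.take_left' rfl]
  rw [altLoop_eq_filter_pair]
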